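-- pv_equiv track=rewrite | github.com/smurphboy/Advent-of-Code-2025 | day03/day03part01.py | twodigit
-- ===== SOURCE A (Python) =====
-- def twodigit(number):
--     '''
--     returns the largest two digit number from the integer digits in order
--     '''
--     maxdigit = 0
--     maxidx = 0
--     for idx, digit in enumerate(number[:-2]):
--         if int(digit) > maxdigit: # find highest digit and index
--             maxdigit = int(digit)
--             maxidx = idx
--     seconddigit = 0
--     for digit in number[maxidx+1:-1]:
--         seconddigit = max(seconddigit, int(digit))
--     return (maxdigit*10) + seconddigit
-- ===== SOURCE B (Python) =====
-- def twodigit(number):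
--     '''
--     returns the largest two digit number from the integer digits in order
--     '''
--     best = 0
--     n = len(number)
--     for i in range(n - 2):
--         for j in range(i + 1, n - 1):
--             best = max(best, 10 * int(number[i]) + int(number[j]))
--     return best
-- ===== Notes on version B (the rewrite author's own statement) =====
-- stated objective: alternative
-- what changed: Replaced the two greedy passes (first occurrence of the max tens digit, then max units digit after it) by a brute-force maximum over all valid (i, j) index pairs of 10*d[i]+d[j].
import Mathlib
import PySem

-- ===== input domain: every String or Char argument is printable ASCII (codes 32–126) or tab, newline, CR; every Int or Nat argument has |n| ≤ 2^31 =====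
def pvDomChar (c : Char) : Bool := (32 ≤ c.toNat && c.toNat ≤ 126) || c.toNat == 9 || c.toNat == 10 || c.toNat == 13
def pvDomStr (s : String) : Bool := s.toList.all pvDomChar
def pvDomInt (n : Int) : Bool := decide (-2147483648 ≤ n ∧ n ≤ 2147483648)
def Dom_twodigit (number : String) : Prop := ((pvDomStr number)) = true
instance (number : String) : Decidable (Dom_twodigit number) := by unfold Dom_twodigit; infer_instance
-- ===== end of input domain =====

-- B replaces A's two greedy passes (first occurrence of the max tens digit, then max units digit
-- after it) by a brute-force maximum over all valid (i, j) index pairs — an alternative algorithm.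

-- int(c) for a single digit character c; exact on Pre_ (every character A converts is an ASCII digit)
def pvInt (c : Char) : Int := (c.toNat : Int) - 48

-- the body of A's first for-loop
def pvStep (st : Int × Int) (p : Int × Char) : Int × Int :=
  if pvInt p.2 > st.1 then (pvInt p.2, p.1) else st

-- ===== PORT A =====
def twodigit (number : String) : Int :=
  let cs := number.toList
  let st := (PySem.List.enumerate (PySem.List.slice cs none (some (-2))) 0).foldl pvStep (0, 0)
  let maxdigit := st.1
  let maxidx := st.2
  let seconddigit := (PySem.List.slice cs (some (maxidx + 1)) (some (-1))).foldl
      (fun s c => max s (pvInt c)) 0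
  maxdigit * 10 + seconddigit

-- ===== PORT B =====
def twodigit_alt (number : String) : Int :=
  let cs := number.toList
  let n : Int := cs.length
  (PySem.List.pyRange 0 (n - 2) 1).foldl (fun best i =>
    (PySem.List.pyRange (i + 1) (n - 1) 1).foldl (fun best j =>
      max best (10 * pvInt (PySem.List.pyGetD cs i ' ') + pvInt (PySem.List.pyGetD cs j ' '))) best) 0

-- ===== PRECONDITION & SPEC =====
-- Pre_ excludes exactly the inputs on which A raises ValueError: a string of length ≥ 3 in which
-- some character other than the last is not an ASCII digit (int(digit) fails on it).
def Pre_twodigit (number : String) : Prop :=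
  number.toList.length ≤ 2 ∨ number.toList.dropLast.all Char.isDigit = true
instance (number : String) : Decidable (Pre_twodigit number) := by unfold Pre_twodigit; infer_instance
def pvWitness_twodigit : String := "98153"

def Spec_twodigit (number : String) (out : Int) : Prop := out = twodigit_alt number
instance (number : String) (out : Int) : Decidable (Spec_twodigit number out) := by unfold Spec_twodigit; infer_instance

-- ===== CLAIM (what is proved, stated in full; the proofs are below) =====
def Claim_equal_twodigit : Prop := ∀ (number : String), Dom_twodigit number → Pre_twodigit number → Spec_twodigit number (twodigit number)

-- ===== LEMMAS AND PROOFS =====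
lemma pvInt_isDigit (c : Char) (h : c.isDigit = true) : 0 ≤ pvInt c ∧ pvInt c ≤ 9 := by
  simp [Char.isDigit, UInt32.le_iff_toNat_le] at h
  have : c.val.toNat = c.toNat := rfl
  unfold pvInt
  omega

lemma pvSlice_neg_one {α : Type} (xs : List α) (a : Int) (ha : 0 ≤ a) :
    PySem.List.slice xs (some a) (some (-1)) = (xs.drop a.toNat).take (xs.length - 1 - a.toNat) := by
  simp [PySem.List.slice, PySem.List.clampIdx]
  rcases eq_or_ne xs [] with rfl | hne
  · simp
  · simp [hne]
    split_ifs with h1 h2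
    · exact absurd h1 (by omega)
    · exact absurd h1 (by omega)
    · by_cases h : a.toNat ≤ xs.length
      · rw [Nat.min_eq_left h]; congr 1; omega
      · rw [Nat.min_eq_right (by omega)]
        rw [List.drop_eq_nil_of_le (Nat.le_refl _), List.drop_eq_nil_of_le (by omega)]; simp

lemma pvFoldl_ge {α : Type} (F : Int → α → Int) (l : List α) (a : Int)
    (h1 : ∀ b x, b ≤ F b x) : a ≤ l.foldl F a := by
  induction l generalizing a with
  | nil => simp
  | cons x l ih => exact le_trans (h1 a x) (ih (F a x))

lemma pvFoldl_ge_of_mem {α : Type} (F : Int → α → Int) (l : List α) (a g : Int) (x : α)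
    (hx : x ∈ l) (h1 : ∀ b y, b ≤ F b y) (hg : ∀ b, g ≤ F b x) : g ≤ l.foldl F a := by
  obtain ⟨l1, l2, rfl⟩ := List.append_of_mem hx
  rw [List.foldl_append, List.foldl_cons]
  exact le_trans (hg _) (pvFoldl_ge F l2 _ h1)

lemma pvFoldl_eq_or {α : Type} (F : Int → α → Int) (P : α → Int → Prop) (l : List α) (a : Int)
    (h2 : ∀ b x, F b x = b ∨ P x (F b x)) :
    l.foldl F a = a ∨ ∃ x ∈ l, P x (l.foldl F a) := by
  induction l generalizing a with
  | nil => exact Or.inl rfl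
  | cons x l ih =>
    rw [List.foldl_cons]
    rcases ih (F a x) with h | ⟨y, hy, hp⟩
    · rcases h2 a x with h' | h'
      · exact Or.inl (by rw [h, h'])
      · exact Or.inr ⟨x, by simp, by rw [h]; exact h'⟩
    · exact Or.inr ⟨y, List.mem_cons_of_mem _ hy, hp⟩

lemma pv_greedy (T : List Char) (M i0 : Int)
    (h : (PySem.List.enumerate T 0).foldl pvStep (0, 0) = (M, i0)) :
    0 ≤ M ∧ 0 ≤ i0 ∧ (∀ k < T.length, pvInt (T.getD k ' ') ≤ M) ∧
    ((M = 0 ∧ i0 = 0) ∨ (i0.toNat < T.length ∧ 0 < M ∧ pvInt (T.getD i0.toNat ' ') = M ∧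
      ∀ k < i0.toNat, pvInt (T.getD k ' ') < M)) := by
  induction T using List.reverseRecOn generalizing M i0 with
  | nil =>
    simp [PySem.List.enumerate_nil] at h
    obtain ⟨rfl, rfl⟩ := h
    refine ⟨le_refl _, le_refl _, by simp, Or.inl ⟨rfl, rfl⟩⟩
  | append_singleton T x ih =>
    rw [PySem.List.enumerate_append, List.foldl_append,
        PySem.List.enumerate_cons, PySem.List.enumerate_nil] at h
    rw [List.foldl_cons, List.foldl_nil] at h
    obtain ⟨⟨M0, j0⟩, hst⟩ : ∃ p : Int × Int, (PySem.List.enumerate T 0).foldl pvStep (0, 0) = p := ⟨_, rfl⟩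
    rw [hst] at h
    obtain ⟨g1, g2, g3, g4⟩ := ih M0 j0 hst
    unfold pvStep at h
    simp only at h
    by_cases hcmp : pvInt x > M0
    · rw [if_pos hcmp] at h
      obtain ⟨rfl, rfl⟩ := Prod.mk.injEq .. ▸ h  -- h : (pvInt x, 0 + ↑T.length) = (M, i0)
      have hL : ((0 : Int) + (T.length : Int)).toNat = T.length := by omega
      refine ⟨by omega, by omega, ?_, Or.inr ?_⟩
      · intro k hk
        simp only [List.length_append, List.length_cons, List.length_nil] at hk
        rcases Nat.lt_or_ge k T.length with hk' | hk'
        · rw [List.getD_append _ _ _ _ hk']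
          have := g3 k hk'
          omega
        · have hkeq : k = T.length := by omega
          subst hkeq
          rw [List.getD_append_right _ _ _ _ (Nat.le_refl _)]
          simp
      · refine ⟨by simp, by omega, ?_, ?_⟩
        · rw [hL, List.getD_append_right _ _ _ _ (Nat.le_refl _)]
          simp
        · intro k hk
          rw [hL] at hk
          rw [List.getD_append _ _ _ _ hk]
          have := g3 k hk
          omega
    · rw [if_neg hcmp] at h
      obtain ⟨rfl, rfl⟩ := Prod.mk.injEq .. ▸ h
      refine ⟨g1, g2, ?_, ?_⟩
      · intro k hk
        simp only [List.length_append, List.length_cons, List.length_nil] at hk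
        rcases Nat.lt_or_ge k T.length with hk' | hk'
        · rw [List.getD_append _ _ _ _ hk']
          exact g3 k hk'
        · have hkeq : k = T.length := by omega
          subst hkeq
          rw [List.getD_append_right _ _ _ _ (Nat.le_refl _)]
          simpa using not_lt.mp hcmp
      · rcases g4 with h4 | ⟨h4a, h4b, h4c, h4d⟩
        · exact Or.inl h4
        · refine Or.inr ⟨by simp; omega, h4b, ?_, ?_⟩
          · rw [List.getD_append _ _ _ _ h4a]
            exact h4c
          · intro k hk
            rw [List.getD_append _ _ _ _ (by omega : k < T.length)]
            exact h4d k hk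

theorem pv_main (number : String)
    (hpre : number.toList.length ≤ 2 ∨ number.toList.dropLast.all Char.isDigit = true) :
    twodigit number = twodigit_alt number := by
  unfold twodigit twodigit_alt
  simp only []
  set cs := number.toList with hcs
  set n := cs.length with hn
  rw [PySem.List.slice_to_neg_ofNat cs 2 (by omega)]
  by_cases hsmall : n ≤ 2
  · have ht : n - 2 = 0 := by omega
    rw [← hn, ht, List.take_zero, PySem.List.enumerate_nil, List.foldl_nil]
    rw [PySem.List.pyRange_one_eq_nil (by omega)]
    rw [List.foldl_nil]
    rw [pvSlice_neg_one cs _ (by norm_num)]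
    have : ((0 : Int) + 1).toNat = 1 := by norm_num
    rw [this]
    have : n - 1 - 1 = 0 := by omega
    rw [← hn, this, List.take_zero, List.foldl_nil]
    norm_num
  · -- n ≥ 3
    have hn3 : 3 ≤ n := by omega
    have hd : ∀ k, k < n - 1 → (cs.getD k ' ').isDigit = true := by
      intro k hk
      rcases hpre with h | h
      · omega
      · rw [List.getD_eq_getElem cs ' ' (by omega : k < cs.length)]
        have hk' : k < cs.dropLast.length := by simp [List.length_dropLast]; omega
        have heq : cs[k]'(by omega) = cs.dropLast[k]'hk' := by rw [List.getElem_dropLast]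
        rw [heq]
        exact List.all_eq_true.mp h _ (List.getElem_mem hk')
    have hb : ∀ k, k < n - 1 → 0 ≤ pvInt (cs.getD k ' ') ∧ pvInt (cs.getD k ' ') ≤ 9 :=
      fun k hk => pvInt_isDigit _ (hd k hk)
    obtain ⟨⟨M, i0⟩, hst⟩ : ∃ p : Int × Int,
        (PySem.List.enumerate (cs.take (n - 2)) 0).foldl pvStep (0, 0) = p := ⟨_, rfl⟩
    rw [hst]
    obtain ⟨g1, g2, g3, g4⟩ := pv_greedy _ _ _ hst
    have hTlen : (cs.take (n - 2)).length = n - 2 := by simp [List.length_take]; omega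
    have hT : ∀ k, k < n - 2 → (cs.take (n - 2)).getD k ' ' = cs.getD k ' ' := by
      intro k hk
      rw [List.getD_eq_getElem _ ' ' (by omega : k < (cs.take (n-2)).length),
          List.getD_eq_getElem cs ' ' (by omega : k < cs.length)]
      simp [List.getElem_take]
    have hM : ∀ k, k < n - 2 → pvInt (cs.getD k ' ') ≤ M := by
      intro k hk
      have := g3 k (by omega)
      rwa [hT k hk] at this
    have hi0 : i0.toNat < n - 2 ∧ pvInt (cs.getD i0.toNat ' ') = M ∧
        ∀ k, k < i0.toNat → pvInt (cs.getD k ' ') < M := by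
      rcases g4 with ⟨hM0, hI0⟩ | ⟨h4a, h4b, h4c, h4d⟩
      · subst hM0; subst hI0
        refine ⟨by omega, ?_, by omega⟩
        have h1 := hM 0 (by omega)
        have h2 := (hb 0 (by omega)).1
        simp only [Int.toNat_zero]
        omega
      · rw [hTlen] at h4a
        refine ⟨h4a, ?_, ?_⟩
        · rw [← hT i0.toNat h4a]; exact h4c
        · intro k hk
          rw [← hT k (by omega)]
          exact h4d k hk
    -- units fold
    rw [pvSlice_neg_one cs _ (by omega)]
    have hi1 : (i0 + 1).toNat = i0.toNat + 1 := by omega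
    rw [hi1]
    obtain ⟨S, hSdef⟩ : ∃ S : Int,
        ((cs.drop (i0.toNat + 1)).take (n - 1 - (i0.toNat + 1))).foldl
          (fun s c => max s (pvInt c)) 0 = S := ⟨_, rfl⟩
    rw [hSdef]
    have hUlen : ((cs.drop (i0.toNat + 1)).take (n - 1 - (i0.toNat + 1))).length
        = n - 1 - (i0.toNat + 1) := by
      simp [List.length_take, List.length_drop]; omega
    have hUget : ∀ t (h : t < n - 1 - (i0.toNat + 1)),
        ((cs.drop (i0.toNat + 1)).take (n - 1 - (i0.toNat + 1))).getD t ' '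
          = cs.getD (i0.toNat + 1 + t) ' ' := by
      intro t ht
      rw [List.getD_eq_getElem _ ' ' (by omega : t < _), List.getD_eq_getElem cs ' ' (by omega : i0.toNat + 1 + t < cs.length)]
      simp [List.getElem_take, List.getElem_drop]
    have s1 : 0 ≤ S := hSdef ▸ pvFoldl_ge _ _ _ (fun b c => le_max_left _ _)
    have s2 : ∀ j, i0.toNat + 1 ≤ j → j < n - 1 → pvInt (cs.getD j ' ') ≤ S := by
      intro j hj1 hj2
      have ht : j - (i0.toNat + 1) < n - 1 - (i0.toNat + 1) := by omega
      have hjj : i0.toNat + 1 + (j - (i0.toNat + 1)) = j := by omega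
      have hmem : cs.getD j ' ' ∈ (cs.drop (i0.toNat + 1)).take (n - 1 - (i0.toNat + 1)) := by
        rw [← hjj, ← hUget _ ht]
        rw [List.getD_eq_getElem _ ' ' (by omega : j - (i0.toNat + 1) < _)]
        exact List.getElem_mem _
      calc pvInt (cs.getD j ' ')
          ≤ _ := pvFoldl_ge_of_mem _ _ 0 _ _ hmem (fun b c => le_max_left _ _)
                  (fun b => le_max_right _ _)
        _ = S := hSdef
    have s3 : S = 0 ∨ ∃ j, i0.toNat + 1 ≤ j ∧ j < n - 1 ∧ S = pvInt (cs.getD j ' ') := by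
      rcases pvFoldl_eq_or _ (fun c v => v = pvInt c) _ 0 (fun b c => max_choice _ _) with h | ⟨c, hc, hv⟩
      · exact Or.inl (hSdef ▸ h)
      · right
        obtain ⟨t, ht, hct⟩ := List.mem_iff_getElem.mp hc
        rw [hUlen] at ht
        refine ⟨i0.toNat + 1 + t, by omega, by omega, ?_⟩
        rw [← hUget t ht, List.getD_eq_getElem _ ' ' (by omega : t < _), hct, ← hSdef]
        exact hv
    -- B side
    obtain ⟨Bv, hBv⟩ : ∃ v : Int,
        List.foldl (fun best i =>
          (PySem.List.pyRange (i + 1) ((n : Int) - 1) 1).foldl (fun best j =>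
            max best (10 * pvInt (PySem.List.pyGetD cs i ' ') + pvInt (PySem.List.pyGetD cs j ' '))) best)
          0 (PySem.List.pyRange 0 ((n : Int) - 2) 1) = v := ⟨_, rfl⟩
    rw [hBv]
    have b1 : 0 ≤ Bv := by
      rw [← hBv]
      exact pvFoldl_ge _ _ _ (fun b i => pvFoldl_ge _ _ _ (fun b x => le_max_left _ _))
    have b2 : ∀ i j : Int, 0 ≤ i → i < (n : Int) - 2 → i + 1 ≤ j → j < (n : Int) - 1 →
        10 * pvInt (PySem.List.pyGetD cs i ' ') + pvInt (PySem.List.pyGetD cs j ' ') ≤ Bv := by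
      intro i j h1 h2 h3 h4
      rw [← hBv]
      refine pvFoldl_ge_of_mem _ _ 0 _ i (PySem.List.mem_pyRange_one.mpr ⟨h1, h2⟩)
        (fun b y => pvFoldl_ge _ _ _ (fun b x => le_max_left _ _)) (fun b => ?_)
      exact pvFoldl_ge_of_mem _ _ b _ j (PySem.List.mem_pyRange_one.mpr ⟨h3, h4⟩)
        (fun b x => le_max_left _ _) (fun b => le_max_right _ _)
    have b3 : Bv = 0 ∨ ∃ i j : Int, 0 ≤ i ∧ i < (n : Int) - 2 ∧ i + 1 ≤ j ∧ j < (n : Int) - 1 ∧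
        Bv = 10 * pvInt (PySem.List.pyGetD cs i ' ') + pvInt (PySem.List.pyGetD cs j ' ') := by
      have hstep : ∀ (b : Int) (i : Int),
          (PySem.List.pyRange (i + 1) ((n : Int) - 1) 1).foldl (fun best j =>
            max best (10 * pvInt (PySem.List.pyGetD cs i ' ') + pvInt (PySem.List.pyGetD cs j ' '))) b = b ∨
          (∃ j : Int, i + 1 ≤ j ∧ j < (n : Int) - 1 ∧
            ((PySem.List.pyRange (i + 1) ((n : Int) - 1) 1).foldl (fun best j =>
              max best (10 * pvInt (PySem.List.pyGetD cs i ' ') + pvInt (PySem.List.pyGetD cs j ' '))) b)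
              = 10 * pvInt (PySem.List.pyGetD cs i ' ') + pvInt (PySem.List.pyGetD cs j ' ')) := by
        intro b i
        rcases pvFoldl_eq_or _
            (fun j v => v = 10 * pvInt (PySem.List.pyGetD cs i ' ') + pvInt (PySem.List.pyGetD cs j ' '))
            (PySem.List.pyRange (i + 1) ((n : Int) - 1) 1) b
            (fun b j => max_choice _ _) with h | ⟨j, hj, hv⟩
        · exact Or.inl h
        · exact Or.inr ⟨j, (PySem.List.mem_pyRange_one.mp hj).1, (PySem.List.mem_pyRange_one.mp hj).2, hv⟩
      rcases pvFoldl_eq_or _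
          (fun i v => ∃ j : Int, i + 1 ≤ j ∧ j < (n : Int) - 1 ∧
            v = 10 * pvInt (PySem.List.pyGetD cs i ' ') + pvInt (PySem.List.pyGetD cs j ' '))
          (PySem.List.pyRange 0 ((n : Int) - 2) 1) 0 hstep with h | ⟨i, hi, j, hj1, hj2, hv⟩
      · exact Or.inl (hBv ▸ h)
      · exact Or.inr ⟨i, j, (PySem.List.mem_pyRange_one.mp hi).1, (PySem.List.mem_pyRange_one.mp hi).2,
          hj1, hj2, hBv ▸ hv⟩
    -- final comparison
    refine le_antisymm ?_ ?_
    · rcases s3 with hS0 | ⟨j, hj1, hj2, hSj⟩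
      · have h2 := (hb (i0.toNat + 1) (by omega)).1
        have h3 := s2 (i0.toNat + 1) (by omega) (by omega)
        have hc := b2 (i0.toNat : Int) ((i0.toNat + 1 : Nat) : Int)
          (by omega) (by omega) (by omega) (by omega)
        simp only [PySem.List.pyGetD_natCast] at hc
        have hgM := hi0.2.1
        omega
      · have hc := b2 (i0.toNat : Int) (j : Int) (by omega) (by omega) (by omega) (by omega)
        simp only [PySem.List.pyGetD_natCast] at hc
        have hgM := hi0.2.1
        omega
    · rcases b3 with hB0 | ⟨i, j, hI0, hI1, hI2, hI3, hBc⟩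
      · omega
      · clear s3 hSdef
        have hieq : i = (i.toNat : Int) := (Int.toNat_of_nonneg hI0).symm
        have hjeq : j = (j.toNat : Int) := (Int.toNat_of_nonneg (by omega)).symm
        rw [hieq, hjeq] at hBc
        simp only [PySem.List.pyGetD_natCast] at hBc
        have hki : i.toNat < n - 2 := by omega
        have hkj : j.toNat < n - 1 := by omega
        by_cases hcase : i.toNat < i0.toNat
        · have h1 := hi0.2.2 i.toNat hcase
          have h2 := (hb j.toNat (by omega)).2
          have h2' := (hb j.toNat (by omega)).1
          omega
        · have h1 := hM i.toNat hki
          have h2 := s2 j.toNat (by omega) hkj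
          omega


-- ===== VERDICT (by name: the statement is the Claim_ definition above) =====
theorem twodigit_spec : Claim_equal_twodigit := by
  intro number _ hpre
  exact pv_main number hpre
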